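-- pv_equiv track=rewrite | github.com/pypi-data/pypi-mirror-342 | packages/YeatBigTonka/YeatBigTonka-0.8.0-py3-none-any.whl/mylibrary/heap.py | insert_into_heap
-- ===== SOURCE A (Python) =====
-- def insert_into_heap(heap, new_element):
--     """
--     Вставляет новый элемент в бинарную кучу (min-heap) и восстанавливает свойство кучи.
--
--     :param heap: list, текущая бинарная куча (min-heap)
--     :param new_element: int, новый элемент для вставки
--     :return: list, измененная куча после вставки
--     """
--     # Шаг 1: Добавляем новый элемент в конец кучи
--     heap.append(new_element)
--     index = len(heap) - 1  # Индекс нового элемента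
--
--     # Шаг 2: Восстанавливаем свойство кучи (bubble-up)
--     while index > 0:
--         parent_index = (index - 1) // 2  # Индекс родительского узла
--         if heap[parent_index] <= heap[index]:  # Условие для min-heap
--             break  # Свойство кучи восстановлено
--         # Меняем местами элемент и его родителя
--         heap[parent_index], heap[index] = heap[index], heap[parent_index]
--         index = parent_index  # Переходим к родительскому узлу
--
--     return heap
-- ===== SOURCE B (Python) =====
-- def insert_into_heap(heap, new_element):
--     # Staged passes: (1) list the new slot's ancestors, (2) count how many are
--     # displaced, (3) apply that shift in bulk from a snapshot of the chain values.
--     anc = []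
--     i = len(heap)
--     while i:
--         i = (i - 1) // 2
--         anc.append(i)
--     shifted = 0
--     for q in anc:
--         if heap[q] > new_element:
--             shifted += 1
--         else:
--             break
--     chain = [len(heap)] + anc[:shifted]
--     heap.append(new_element)
--     vals = [heap[q] for q in chain]
--     for t in range(len(chain) - 1):
--         heap[chain[t]] = vals[t + 1]
--     heap[chain[-1]] = new_element
--     return heap
-- ===== Notes on version B (the rewrite author's own statement) =====
-- stated objective: alternative
-- what changed: Replaces A's single interleaved compare-and-swap bubble-up loop with three staged passes: build the slot's ancestor index list, count how many ancestors are displaced, then apply the whole shift in bulk from a snapshot of the chain values with one final write of the new element.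
import Mathlib
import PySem

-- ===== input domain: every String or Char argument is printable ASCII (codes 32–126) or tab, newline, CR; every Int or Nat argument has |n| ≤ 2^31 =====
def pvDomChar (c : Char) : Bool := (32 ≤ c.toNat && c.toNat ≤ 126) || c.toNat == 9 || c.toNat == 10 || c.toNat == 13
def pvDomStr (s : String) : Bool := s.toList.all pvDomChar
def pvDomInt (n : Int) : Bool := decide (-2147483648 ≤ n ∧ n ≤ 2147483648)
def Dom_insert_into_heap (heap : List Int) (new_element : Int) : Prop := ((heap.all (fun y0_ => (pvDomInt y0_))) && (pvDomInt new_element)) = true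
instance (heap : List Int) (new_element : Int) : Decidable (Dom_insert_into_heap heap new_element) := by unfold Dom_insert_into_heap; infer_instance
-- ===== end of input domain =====

-- B replaces A's interleaved compare-and-swap bubble-up by three staged passes
-- (list the slot's ancestors, count the displaced ones, bulk-shift from a snapshot);
-- same cost. Both Pythons mutate `heap` in place to the same final state; the
-- equivalence proved here is about the return value.

-- ===== PORT A =====
-- A's bubble-up loop: indices are always nonnegative and < h.length, so List.getD is
-- exact for Python's heap[j] here; the simultaneous assignment evaluates the RHS pair
-- first, hence set p (old h[i]) then set i (old h[p]).
def aLoop (h : List Int) (i : Nat) : List Int :=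
  if _hi : 0 < i then
    if h.getD ((i-1)/2) 0 ≤ h.getD i 0 then h
    else aLoop ((h.set ((i-1)/2) (h.getD i 0)).set i (h.getD ((i-1)/2) 0)) ((i-1)/2)
  else h
termination_by i
decreasing_by omega

def insert_into_heap (heap : List Int) (new_element : Int) : List Int :=
  aLoop (heap ++ [new_element]) ((heap ++ [new_element]).length - 1)

-- ===== PORT B =====
-- B's pass 1: the `while i: i=(i-1)//2; anc.append(i)` loop.
def ancList (i : Nat) : List Nat :=
  if _h : 0 < i then ((i-1)/2) :: ancList ((i-1)/2) else []
termination_by i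
decreasing_by omega

-- B's pass 2: the `for q in anc: … else break` counting loop.
def countShift (h : List Int) (x : Int) : List Nat → Nat
  | [] => 0
  | q :: r => if h.getD q 0 > x then 1 + countShift h x r else 0

def insert_into_heap_alt (heap : List Int) (new_element : Int) : List Int :=
  let anc := ancList heap.length
  let shifted := countShift heap new_element anc
  let chain := heap.length :: anc.take shifted
  let h1 := heap ++ [new_element]
  let vals := chain.map (fun q => h1.getD q 0)
  -- B's pass 3: `for t in range(len(chain)-1): heap[chain[t]] = vals[t+1]`
  let h2 := (List.range (chain.length - 1)).foldl
              (fun hh t => hh.set (chain.getD t 0) (vals.getD (t+1) 0)) h1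
  h2.set (chain.getLastD 0) new_element

-- ===== PRECONDITION & SPEC =====
def Spec_insert_into_heap (heap : List Int) (new_element : Int) (out : List Int) : Prop := out = insert_into_heap_alt heap new_element
instance (heap : List Int) (new_element : Int) (out : List Int) : Decidable (Spec_insert_into_heap heap new_element out) := by unfold Spec_insert_into_heap; infer_instance

-- ===== CLAIM (what is proved, stated in full; the proofs are below) =====
def Claim_equal_insert_into_heap : Prop := ∀ (heap : List Int) (new_element : Int), Dom_insert_into_heap heap new_element → Spec_insert_into_heap heap new_element (insert_into_heap heap new_element)

-- ===== LEMMAS AND PROOFS =====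

-- Proof intermediary: the classic "hole" bubble-up, bridging A's swap loop and B's
-- staged shift (used only in the proofs below, not by either port).
def bLoop (h : List Int) (i : Nat) (x : Int) : List Int :=
  if _hi : 0 < i then
    if h.getD ((i-1)/2) 0 > x then bLoop (h.set i (h.getD ((i-1)/2) 0)) ((i-1)/2) x
    else h.set i x
  else h.set i x
termination_by i
decreasing_by omega

-- bLoop never reads position i (the hole), so its value there is irrelevant.
theorem bLoop_set_hole (h : List Int) (i : Nat) (v x : Int) :
    bLoop (h.set i v) i x = bLoop h i x := by
  conv_lhs => rw [bLoop]
  conv_rhs => rw [bLoop]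
  by_cases hi : 0 < i
  · have hne : i ≠ (i-1)/2 := by omega
    simp only [dif_pos hi, List.getD_eq_getElem?_getD, List.getElem?_set_ne hne, List.set_set]
  · simp only [dif_neg hi, List.set_set]

-- Bubbling up h[i] by swaps equals the hole method carrying x = h[i].
theorem aLoop_eq_bLoop (i : Nat) (h : List Int) (hlen : i < h.length) :
    aLoop h i = bLoop h i (h.getD i 0) := by
  induction i using Nat.strong_induction_on generalizing h with
  | _ i ih =>
    conv_lhs => rw [aLoop]
    conv_rhs => rw [bLoop]
    by_cases hi : 0 < i
    · have hp : (i-1)/2 < i := by omega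
      have hpl : (i-1)/2 < h.length := by omega
      have hne : i ≠ (i-1)/2 := by omega
      by_cases hle : h.getD ((i-1)/2) 0 ≤ h.getD i 0
      · simp only [dif_pos hi, if_pos hle, if_neg (not_lt.mpr hle)]
        rw [List.getD_eq_getElem?_getD, List.getElem?_eq_getElem hlen, Option.getD_some,
            List.set_getElem_self]
      · simp only [dif_pos hi, if_neg hle, if_pos (not_le.mp hle)]
        set h' := (h.set ((i-1)/2) (h.getD i 0)).set i (h.getD ((i-1)/2) 0) with hh'
        have hlen' : (i-1)/2 < h'.length := by simp [hh', hpl]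
        have hval : h'.getD ((i-1)/2) 0 = h.getD i 0 := by
          rw [hh', List.getD_eq_getElem?_getD, List.getElem?_set_ne hne,
              List.getElem?_set_self hpl, Option.getD_some]
        rw [ih _ hp h' hlen', hval]
        have hcomm : h' = (h.set i (h.getD ((i-1)/2) 0)).set ((i-1)/2) (h.getD i 0) := by
          rw [hh']; exact List.set_comm _ _ hne.symm
        rw [hcomm, bLoop_set_hole]
    · simp only [dif_neg hi]
      rw [List.getD_eq_getElem?_getD, List.getElem?_eq_getElem hlen, Option.getD_some,
          List.set_getElem_self]

-- every ancestor index is strictly below the slot index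
theorem mem_ancList_lt (i : Nat) : ∀ q ∈ ancList i, q < i := by
  induction i using Nat.strong_induction_on with
  | _ i ih =>
    intro q hq
    rw [ancList] at hq
    by_cases hi : 0 < i
    · rw [dif_pos hi] at hq
      have hp : (i-1)/2 < i := by omega
      rcases List.mem_cons.mp hq with h1 | h1
      · omega
      · exact lt_trans (ih _ hp _ h1) hp
    · rw [dif_neg hi] at hq; cases hq

-- countShift only reads the listed positions
theorem countShift_congr (h h' : List Int) (x : Int) (l : List Nat)
    (hag : ∀ q ∈ l, h'.getD q 0 = h.getD q 0) : countShift h' x l = countShift h x l := by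
  induction l with
  | nil => rfl
  | cons q r ih =>
    simp only [countShift, hag q (List.mem_cons_self ..)]
    rw [ih (fun a ha => hag a (List.mem_cons_of_mem _ ha))]

-- the indexed write loop is a fold over the (position, value) pairs
theorem rangeFold_zip (chain : List Nat) (vals : List Int) (h : List Int)
    (hl : vals.length = chain.length) :
    (List.range (chain.length - 1)).foldl
        (fun hh t => hh.set (chain.getD t 0) (vals.getD (t+1) 0)) h
      = (chain.zip vals.tail).foldl (fun hh (p : Nat × Int) => hh.set p.1 p.2) h := by
  induction chain generalizing vals h with
  | nil => simp
  | cons c cs ih =>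
    cases vals with
    | nil => simp at hl
    | cons v vs =>
      have hlv : vs.length = cs.length := by simpa using hl
      cases cs with
      | nil =>
        have hvs : vs = [] := List.length_eq_zero_iff.mp hlv
        subst hvs; simp
      | cons c2 cs' =>
        cases vs with
        | nil => simp at hlv
        | cons v2 vs' =>
          have hl' : (v2 :: vs').length = (c2 :: cs').length := hlv
          have hIH := ih (v2 :: vs') (h.set c v2) hl'
          simp only [List.length_cons, Nat.add_sub_cancel] at hIH ⊢
          rw [List.range_succ_eq_map, List.foldl_cons, List.foldl_map]
          simp only [List.getD_cons_zero, List.getD_cons_succ, Nat.succ_eq_add_one,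
            List.tail_cons, List.zip_cons_cons, List.foldl_cons] at hIH ⊢
          exact hIH

-- B's staged core, in the zip-fold form, parametrised by the slot index.
def stg (h : List Int) (i : Nat) (x : Int) : List Int :=
  let chain := i :: (ancList i).take (countShift h x (ancList i))
  let vals := chain.map (fun q => h.getD q 0)
  ((chain.zip vals.tail).foldl (fun hh (p : Nat × Int) => hh.set p.1 p.2) h).set
    (chain.getLastD 0) x

-- The hole method equals B's staged shift.
theorem bLoop_eq_stg (i : Nat) (h : List Int) (x : Int) : bLoop h i x = stg h i x := by
  induction i using Nat.strong_induction_on generalizing h with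
  | _ i ih =>
    rw [bLoop]
    by_cases hi : 0 < i
    · have hp : (i-1)/2 < i := by omega
      have hne : (i-1)/2 ≠ i := by omega
      rw [dif_pos hi]
      have hanc : ancList i = ((i-1)/2) :: ancList ((i-1)/2) := by
        rw [ancList, dif_pos hi]
      by_cases hgt : h.getD ((i-1)/2) 0 > x
      · rw [if_pos hgt, ih _ hp]
        -- both sides are stg at the parent after the hole shift
        set p := (i-1)/2 with hpdef
        set h' := h.set i (h.getD p 0) with hh'
        have hag : ∀ q ∈ ancList p, h'.getD q 0 = h.getD q 0 := by
          intro q hq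
          have : q < p := mem_ancList_lt _ _ hq
          have hqi : q ≠ i := by omega
          rw [hh', List.getD_eq_getElem?_getD, List.getElem?_set_ne (Ne.symm hqi),
              ← List.getD_eq_getElem?_getD]
        have hcount : countShift h' x (ancList p) = countShift h x (ancList p) := by
          exact countShift_congr h h' x _ hag
        unfold stg
        set j := countShift h x (ancList p) with hj
        have hcnt_i : countShift h x (p :: ancList p) = 1 + j := by
          simp only [countShift, if_pos hgt, hj]
        have htake : (p :: ancList p).take (1 + j) = p :: (ancList p).take j := by
          rw [Nat.add_comm]; rfl
        simp only [hcount, hanc, hcnt_i, htake]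
        -- chains: LHS (for h', p) = p :: r ; RHS (for h, i) = i :: p :: r
        set r := (ancList p).take j with hr
        have hrmem : ∀ q ∈ r, q ∈ ancList p := fun q hq => List.take_subset _ _ hq
        have hmap : r.map (fun q => h'.getD q 0) = r.map (fun q => h.getD q 0) := by
          apply List.map_congr_left; intro q hq; exact hag q (hrmem q hq)
        have hvp : h'.getD p 0 = h.getD p 0 := by
          rw [hh', List.getD_eq_getElem?_getD, List.getElem?_set_ne (Ne.symm hne),
              ← List.getD_eq_getElem?_getD]
        simp only [List.map_cons, List.tail_cons, List.zip_cons_cons, List.foldl_cons,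
          hmap, hvp]
        have hlast : ((i : Nat) :: p :: r).getLastD 0 = ((p : Nat) :: r).getLastD 0 := by
          rw [List.getLastD_eq_getLast?, List.getLastD_eq_getLast?, List.getLast?_cons_cons]
        rw [hlast, hh']
      · rw [if_neg hgt]
        unfold stg
        have hcnt : countShift h x (ancList i) = 0 := by
          rw [hanc]; simp only [countShift, if_neg hgt]
        simp [hcnt]
    · rw [dif_neg hi]
      have : i = 0 := by omega
      subst this
      unfold stg
      have : ancList 0 = [] := by rw [ancList]; simp
      simp [this]

-- insert_into_heap_alt is stg at the appended list
theorem alt_eq_stg (heap : List Int) (x : Int) :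
    insert_into_heap_alt heap x = stg (heap ++ [x]) heap.length x := by
  unfold insert_into_heap_alt stg
  have hag : ∀ q ∈ ancList heap.length, (heap ++ [x]).getD q 0 = heap.getD q 0 := by
    intro q hq
    have hql : q < heap.length := mem_ancList_lt _ _ hq
    rw [List.getD_eq_getElem?_getD, List.getElem?_append_left hql,
        ← List.getD_eq_getElem?_getD]
  have hcount : countShift (heap ++ [x]) x (ancList heap.length)
      = countShift heap x (ancList heap.length) := countShift_congr _ _ _ _ hag
  simp only [hcount]
  rw [rangeFold_zip]
  simp

-- ===== VERDICT (by name: the statement is the Claim_ definition above) =====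
theorem insert_into_heap_spec : Claim_equal_insert_into_heap := by
  intro heap new_element _
  unfold Spec_insert_into_heap insert_into_heap
  have hlen : (heap ++ [new_element]).length - 1 < (heap ++ [new_element]).length := by simp
  rw [aLoop_eq_bLoop _ _ hlen, alt_eq_stg]
  have hidx : (heap ++ [new_element]).length - 1 = heap.length := by simp
  have hval : (heap ++ [new_element]).getD ((heap ++ [new_element]).length - 1) 0 = new_element := by
    rw [hidx, List.getD_eq_getElem?_getD]; simp
  rw [hval, hidx, bLoop_eq_stg]
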